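-- pv_equiv track=rewrite | github.com/AmitaiBiton/Image-Processing-Project | projectIM2021_q2.py | Finger_Size
-- ===== SOURCE A (Python) =====
-- def Finger_Size(circles):
--     list =[]
--     for i in circles[0]:
--         for j in circles[0]:
--             if i[1]!=j[1] and abs(i[1]-j[1])>10:
--                 list.append(abs(i[1]-j[1]))
--     if len(list)!=0:
--         if min(list) <35:
--             return 50
--     elif len(list) ==0:
--         return 50
--     return min(list)
-- ===== SOURCE B (Python) =====
-- def Finger_Size(circles):
--     # Sort the y-values; for each value, only its nearest larger neighbour beyond
--     # the gap 10 can realize the minimum, so scan forward and break at the first hit.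
--     ys = sorted(p[1] for p in circles[0])
--     best = None
--     n = len(ys)
--     for i in range(n):
--         y = ys[i]
--         for k in range(i + 1, n):
--             z = ys[k]
--             if z - y > 10:
--                 d = z - y
--                 if best is None or d < best:
--                     best = d
--                 break
--     if best is None or best < 35:
--         return 50
--     return best
-- ===== Notes on version B (the rewrite author's own statement) =====
-- stated objective: alternative
-- what changed: Instead of collecting |y_i - y_j| for all ordered pairs into a list and taking min at the end, B sorts the y-values once and, for each value, scans forward only to the first (hence smallest) larger value whose gap exceeds 10, keeping a running minimum.
import Mathlib
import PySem

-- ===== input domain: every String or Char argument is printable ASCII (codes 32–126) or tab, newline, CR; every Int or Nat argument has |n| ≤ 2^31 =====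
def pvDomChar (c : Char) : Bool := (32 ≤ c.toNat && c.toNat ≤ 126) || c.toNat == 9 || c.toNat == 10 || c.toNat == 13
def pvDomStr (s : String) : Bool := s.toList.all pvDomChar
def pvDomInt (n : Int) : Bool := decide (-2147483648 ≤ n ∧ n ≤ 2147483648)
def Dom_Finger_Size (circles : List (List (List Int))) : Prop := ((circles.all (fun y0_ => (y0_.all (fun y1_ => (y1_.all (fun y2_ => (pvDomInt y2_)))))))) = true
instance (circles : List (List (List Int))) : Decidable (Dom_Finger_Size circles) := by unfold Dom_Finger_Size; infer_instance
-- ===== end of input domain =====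

-- B sorts the y-values once and scans each value forward only to its nearest larger value
-- whose gap exceeds 10, instead of A's full double loop collecting every pairwise gap.


-- ===== PORT A =====
-- i[1] is ported as pyGetD _ 1 0: Pre_ guarantees every inner list has length ≥ 2, so the
-- default is never read; circles[0] on empty circles raises in Python and is excluded by Pre_.
def Finger_Size (circles : List (List (List Int))) : Int :=
  match circles with
  | [] => 0  -- Python raises IndexError here; excluded by Pre_Finger_Size
  | c0 :: _ =>
    let lst : List Int := c0.foldl (fun acc i =>
      c0.foldl (fun acc j =>
        if PySem.List.pyGetD i 1 0 ≠ PySem.List.pyGetD j 1 0 ∧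
           10 < |PySem.List.pyGetD i 1 0 - PySem.List.pyGetD j 1 0| then
          acc ++ [|PySem.List.pyGetD i 1 0 - PySem.List.pyGetD j 1 0|]
        else acc) acc) []
    if lst.length ≠ 0 then
      if (PySem.List.min? lst (fun x => x)).getD 0 < 35 then 50
      else (PySem.List.min? lst (fun x => x)).getD 0
    else 50

-- ===== PORT B =====
-- the inner 'for … break' of Source B: skip gaps ≤ 10, look at the first larger value (if any)
def FS_step (best : Option Int) (y : Int) (rest : List Int) : Option Int :=
  match (rest.dropWhile (fun z => z - y ≤ 10)).head? with
  | none => best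
  | some z =>
    match best with
    | none => some (z - y)
    | some m => if z - y < m then some (z - y) else some m

def FS_loop : List Int → Option Int → Option Int
  | [], best => best
  | y :: rest, best => FS_loop rest (FS_step best y rest)

def Finger_Size_alt (circles : List (List (List Int))) : Int :=
  match circles with
  | [] => 0  -- Python raises IndexError here; excluded by Pre_Finger_Size
  | c0 :: _ =>
    let ys := PySem.List.sorted (c0.map fun p => PySem.List.pyGetD p 1 0) (fun x => x) false
    match FS_loop ys none with
    | none => 50
    | some m => if m < 35 then 50 else m

-- ===== PRECONDITION & SPEC =====
-- Pre_ excludes exactly the inputs where Python A raises: empty circles (IndexError on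
-- circles[0]) and inner lists of length < 2 in circles[0] (IndexError on i[1]).
def Pre_Finger_Size (circles : List (List (List Int))) : Prop :=
  circles ≠ [] ∧ ∀ p ∈ circles.headI, 2 ≤ p.length
instance (circles : List (List (List Int))) : Decidable (Pre_Finger_Size circles) := by
  unfold Pre_Finger_Size; infer_instance
def pvWitness_Finger_Size : List (List (List Int)) := [[[0, 5, 2], [1, 40, 2], [3, 22, 1]]]
def Spec_Finger_Size (circles : List (List (List Int))) (out : Int) : Prop := out = Finger_Size_alt circles
instance (circles : List (List (List Int))) (out : Int) : Decidable (Spec_Finger_Size circles out) := by unfold Spec_Finger_Size; infer_instance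

-- ===== CLAIM (what is proved, stated in full; the proofs are below) =====
def Claim_equal_Finger_Size : Prop := ∀ (circles : List (List (List Int))), Dom_Finger_Size circles → Pre_Finger_Size circles → Spec_Finger_Size circles (Finger_Size circles)

-- ===== LEMMAS AND PROOFS =====

-- the gaps both programs are about: 'd is a gap > 10 between two of the values vs'
def FS_Good (vs : List Int) (d : Int) : Prop := 10 < d ∧ ∃ a ∈ vs, ∃ b ∈ vs, b - a = d

-- positional form of the same gaps, on the sorted list
def FS_GoodL (ys : List Int) (d : Int) : Prop := 10 < d ∧ ∃ a b, [a, b].Sublist ys ∧ b - a = d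

-- A's collected list contains exactly the gaps FS_Good describes
lemma fs_mem_lst (c0 : List (List Int)) (d : Int) :
    d ∈ c0.foldl (fun acc i =>
      c0.foldl (fun acc j =>
        if PySem.List.pyGetD i 1 0 ≠ PySem.List.pyGetD j 1 0 ∧
           10 < |PySem.List.pyGetD i 1 0 - PySem.List.pyGetD j 1 0| then
          acc ++ [|PySem.List.pyGetD i 1 0 - PySem.List.pyGetD j 1 0|]
        else acc) acc) ([] : List Int)
    ↔ FS_Good (c0.map fun p => PySem.List.pyGetD p 1 0) d := by
  simp only [PySem.List.foldl_append_ite, PySem.List.foldl_append_eq_flatMap, List.nil_append]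
  simp only [List.mem_flatMap, List.mem_map, List.mem_filter, decide_eq_true_eq, FS_Good]
  constructor
  · rintro ⟨i, hi, j, ⟨hj, -, h10⟩, rfl⟩
    refine ⟨h10, ?_⟩
    rcases le_total (PySem.List.pyGetD i 1 0) (PySem.List.pyGetD j 1 0) with h | h
    · exact ⟨_, ⟨i, hi, rfl⟩, _, ⟨j, hj, rfl⟩, by rw [abs_sub_comm, abs_of_nonneg (by omega)]⟩
    · exact ⟨_, ⟨j, hj, rfl⟩, _, ⟨i, hi, rfl⟩, by rw [abs_of_nonneg (by omega)]⟩
  · rintro ⟨h10, a, ⟨i, hi, rfl⟩, b, ⟨j, hj, rfl⟩, hd⟩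
    refine ⟨i, hi, j, ⟨hj, by omega, ?_⟩, ?_⟩ <;>
      rw [abs_sub_comm, abs_of_nonneg (by omega)] <;> omega

-- FS_step when no value beyond the gap exists: the pending value is kept
lemma fs_step_none (best : Option Int) (y : Int) (rest : List Int)
    (hd : (rest.dropWhile (fun z => z - y ≤ 10)).head? = none) :
    FS_step best y rest = best := by
  simp only [FS_step, hd]

-- FS_step when the first value beyond the gap is z: everything the proofs need about the result
lemma fs_step_some (best : Option Int) (y : Int) (rest : List Int) (z : Int)
    (hd : (rest.dropWhile (fun z => z - y ≤ 10)).head? = some z) :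
    ∃ v, FS_step best y rest = some v ∧ v ≤ z - y ∧ (best = some v ∨ v = z - y) ∧
      (∀ b0, best = some b0 → v ≤ b0) := by
  cases best with
  | none =>
    exact ⟨z - y, by simp only [FS_step, hd], le_refl _, Or.inr rfl, by intro b0 h; cases h⟩
  | some b0 =>
    by_cases hlt : z - y < b0
    · exact ⟨z - y, by simp only [FS_step, hd]; rw [if_pos hlt], le_refl _, Or.inr rfl,
        by intro b1 h; injection h with h1; omega⟩
    · exact ⟨b0, by simp only [FS_step, hd]; rw [if_neg hlt], by omega, Or.inl rfl,
        by intro b1 h; injection h with h1; omega⟩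

-- the head of the dropWhile suffix fails the predicate
lemma fs_dropWhile_head_false {p : Int → Bool} {l t : List Int} {z : Int}
    (h : l.dropWhile p = z :: t) : p z = false := by
  induction l with
  | nil => simp at h
  | cons a l ih =>
    rw [List.dropWhile_cons] at h
    by_cases hpa : p a = true
    · rw [if_pos hpa] at h; exact ih h
    · rw [if_neg hpa] at h
      injection h with h1 _
      subst h1; simpa using hpa

-- an element failing the predicate survives dropWhile
lemma fs_mem_dropWhile {p : Int → Bool} {l : List Int} {b : Int}
    (hb : b ∈ l) (hpb : p b = false) : b ∈ l.dropWhile p := by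
  have := List.takeWhile_append_dropWhile (p := p) (l := l)
  rcases List.mem_append.mp (this ▸ hb) with h | h
  · exact absurd (List.mem_takeWhile_imp h) (by simp [hpb])
  · exact h

-- if FS_loop returns none, nothing was pending and no gap exists
lemma fs_goodL_none (ys : List Int) (best : Option Int)
    (h : FS_loop ys best = none) : best = none ∧ ∀ d, ¬ FS_GoodL ys d := by
  induction ys generalizing best with
  | nil => exact ⟨h, by rintro d ⟨-, a, b, hsub, -⟩; simp at hsub⟩
  | cons y rest ih =>
    obtain ⟨hstep, hrest⟩ := ih (FS_step best y rest) h
    have hdw : (rest.dropWhile (fun z => z - y ≤ 10)).head? = none := by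
      cases hd : (rest.dropWhile (fun z => z - y ≤ 10)).head? with
      | none => rfl
      | some z =>
        obtain ⟨v, hv, -⟩ := fs_step_some best y rest z hd
        rw [hv] at hstep; cases hstep
    have hbest : best = none := by rw [← fs_step_none best y rest hdw]; exact hstep
    refine ⟨hbest, ?_⟩
    rintro d ⟨h10, a, b, hsub, hba⟩
    rcases List.sublist_cons_iff.mp hsub with hsub' | ⟨r, hr, hrsub⟩
    · exact hrest d ⟨h10, a, b, hsub', hba⟩
    · cases hr
      have hbmem : b ∈ rest := List.singleton_sublist.mp hrsub
      have hnil : rest.dropWhile (fun z => z - y ≤ 10) = [] := List.head?_eq_none_iff.mp hdw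
      have := List.dropWhile_eq_nil_iff.mp hnil b hbmem
      simp at this; omega

-- if FS_loop returns some m, m is the pending value or a real gap
lemma fs_loop_sound (ys : List Int) (best : Option Int) (m : Int)
    (h : FS_loop ys best = some m) : best = some m ∨ FS_GoodL ys m := by
  induction ys generalizing best with
  | nil => exact Or.inl h
  | cons y rest ih =>
    rcases ih (FS_step best y rest) h with hstep | hgood
    · cases hd : (rest.dropWhile (fun z => z - y ≤ 10)).head? with
      | none => rw [fs_step_none best y rest hd] at hstep; exact Or.inl hstep
      | some z =>
        obtain ⟨v, hv, -, hcase, -⟩ := fs_step_some best y rest z hd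
        rw [hv] at hstep
        injection hstep with hvm
        subst hvm
        rcases hcase with hb | rfl
        · exact Or.inl hb
        · obtain ⟨t, ht⟩ : ∃ t, rest.dropWhile (fun w => w - y ≤ 10) = z :: t := by
            cases he : rest.dropWhile (fun w => w - y ≤ 10) with
            | nil => rw [he] at hd; cases hd
            | cons z' t => rw [he] at hd; injection hd with h1; exact ⟨t, by rw [← h1]⟩
          have hz10 : 10 < z - y := by
            have hfalse := fs_dropWhile_head_false ht
            simp at hfalse; omega
          have hzdw : z ∈ rest.dropWhile (fun w => w - y ≤ 10) := by rw [ht]; simp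
          have hzmem : z ∈ rest := (List.dropWhile_sublist _).subset hzdw
          exact Or.inr ⟨hz10, y, z, (List.singleton_sublist.mpr hzmem).cons₂ y, rfl⟩
    · rcases hgood with ⟨h10, a, b, hsub, hba⟩
      exact Or.inr ⟨h10, a, b, hsub.cons y, hba⟩

-- if FS_loop returns some m, m is ≤ the pending value and ≤ every real gap
lemma fs_loop_min (ys : List Int) (hs : ys.Pairwise (· ≤ ·)) (best : Option Int) (m : Int)
    (h : FS_loop ys best = some m) :
    (∀ b0, best = some b0 → m ≤ b0) ∧ (∀ d, FS_GoodL ys d → m ≤ d) := by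
  induction ys generalizing best with
  | nil =>
    refine ⟨fun b0 hb => by rw [hb] at h; injection h with h1; omega, ?_⟩
    rintro d ⟨-, a, b, hsub, -⟩; simp at hsub
  | cons y rest ih =>
    obtain ⟨hy, hrest⟩ := List.pairwise_cons.mp hs
    obtain ⟨ia, ib⟩ := ih hrest (FS_step best y rest) h
    constructor
    · intro b0 hb
      cases hd : (rest.dropWhile (fun z => z - y ≤ 10)).head? with
      | none => exact ia b0 (by rw [fs_step_none best y rest hd, hb])
      | some z =>
        obtain ⟨v, hv, -, -, hle⟩ := fs_step_some best y rest z hd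
        exact le_trans (ia v hv) (hle b0 hb)
    · rintro d ⟨h10, a, b, hsub, hba⟩
      rcases List.sublist_cons_iff.mp hsub with hsub' | ⟨r, hr, hrsub⟩
      · exact ib d ⟨h10, a, b, hsub', hba⟩
      · cases hr
        have hbmem : b ∈ rest := List.singleton_sublist.mp hrsub
        have hbdw : b ∈ rest.dropWhile (fun z => z - y ≤ 10) :=
          fs_mem_dropWhile hbmem (by simp; omega)
        obtain ⟨z, t, ht⟩ : ∃ z t, rest.dropWhile (fun z => z - y ≤ 10) = z :: t := by
          cases he : rest.dropWhile (fun z => z - y ≤ 10) with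
          | nil => rw [he] at hbdw; simp at hbdw
          | cons z t => exact ⟨z, t, rfl⟩
        have hd : (rest.dropWhile (fun z => z - y ≤ 10)).head? = some z := by
          rw [ht]; rfl
        have hzb : z ≤ b := by
          have hp : (z :: t).Pairwise (fun x1 x2 => x1 ≤ x2) :=
            List.Pairwise.sublist (ht ▸ List.dropWhile_sublist _) hrest
          rcases List.mem_cons.mp (ht ▸ hbdw) with rfl | hbt
          · omega
          · exact (List.pairwise_cons.mp hp).1 b hbt
        obtain ⟨v, hv, hvz, -, -⟩ := fs_step_some best y rest z hd
        have := ia v hv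
        omega

-- in a sorted list, two members a < b occur in order
lemma fs_pair_sublist (ys : List Int) (hs : ys.Pairwise (· ≤ ·)) (a b : Int)
    (ha : a ∈ ys) (hb : b ∈ ys) (hab : a < b) : [a, b].Sublist ys := by
  induction ys with
  | nil => simp at ha
  | cons y t ih =>
    obtain ⟨hy, ht⟩ := List.pairwise_cons.mp hs
    rcases List.mem_cons.mp ha with rfl | hat
    · have hbt : b ∈ t := by
        rcases List.mem_cons.mp hb with rfl | hbt
        · omega
        · exact hbt
      exact (List.singleton_sublist.mpr hbt).cons₂ a
    · have hbt : b ∈ t := by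
        rcases List.mem_cons.mp hb with rfl | hbt
        · have := hy a hat; omega
        · exact hbt
      exact (ih ht hat hbt).cons y

-- the positional gaps of the sorted list are exactly the value gaps
lemma fs_good_iff (vs ys : List Int) (hperm : ys.Perm vs) (hs : ys.Pairwise (· ≤ ·)) (d : Int) :
    FS_GoodL ys d ↔ FS_Good vs d := by
  constructor
  · rintro ⟨h10, a, b, hsub, hba⟩
    exact ⟨h10, a, hperm.mem_iff.mp (hsub.subset (by simp)),
               b, hperm.mem_iff.mp (hsub.subset (by simp)), hba⟩
  · rintro ⟨h10, a, ha, b, hb, hba⟩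
    exact ⟨h10, a, b,
      fs_pair_sublist ys hs a b (hperm.mem_iff.mpr ha) (hperm.mem_iff.mpr hb) (by omega), hba⟩

-- ===== VERDICT (by name: the statement is the Claim_ definition above) =====
theorem Finger_Size_spec : Claim_equal_Finger_Size := by
  intro circles _ hpre
  unfold Spec_Finger_Size
  match circles with
  | [] => exact absurd rfl hpre.1
  | c0 :: crest =>
    simp only [Finger_Size, Finger_Size_alt]
    set vs : List Int := c0.map fun p => PySem.List.pyGetD p 1 0 with hvs
    set ys : List Int := PySem.List.sorted vs (fun x => x) false with hys
    have hperm : ys.Perm vs := PySem.List.sorted_perm vs (fun x => x) false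
    have hs : ys.Pairwise (· ≤ ·) := by
      have := PySem.List.sorted_pairwise vs (fun x => x); simpa using this
    set lst : List Int := c0.foldl (fun acc i =>
      c0.foldl (fun acc j =>
        if PySem.List.pyGetD i 1 0 ≠ PySem.List.pyGetD j 1 0 ∧
           10 < |PySem.List.pyGetD i 1 0 - PySem.List.pyGetD j 1 0| then
          acc ++ [|PySem.List.pyGetD i 1 0 - PySem.List.pyGetD j 1 0|]
        else acc) acc) ([] : List Int) with hlst
    have hmem : ∀ d, d ∈ lst ↔ FS_GoodL ys d := fun d =>
      (fs_mem_lst c0 d).trans (fs_good_iff vs ys hperm hs d).symm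
    cases hB : FS_loop ys none with
    | none =>
      have hno := (fs_goodL_none ys none hB).2
      have hempty : lst = [] := by
        rw [List.eq_nil_iff_forall_not_mem]
        exact fun d hd => hno d ((hmem d).mp hd)
      simp [hempty]
    | some m =>
      have hGm : FS_GoodL ys m := (fs_loop_sound ys none m hB).resolve_left (by simp)
      have hmlst : m ∈ lst := (hmem m).mpr hGm
      have hne : lst ≠ [] := List.ne_nil_of_mem hmlst
      obtain ⟨m', hm'⟩ : ∃ m', PySem.List.min? lst (fun x => x) = some m' := by
        cases hmn : PySem.List.min? lst (fun x => x) with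
        | none => exact absurd ((PySem.List.min?_eq_none_iff lst _).mp hmn) hne
        | some v => exact ⟨v, rfl⟩
      have h1 : m ≤ m' :=
        (fs_loop_min ys hs none m hB).2 m' ((hmem m').mp (PySem.List.min?_mem hm'))
      have h2 : m' ≤ m := PySem.List.min?_isMin hm' m hmlst
      have hmm : m' = m := le_antisymm h2 h1
      have hlen : lst.length ≠ 0 := by
        simpa [List.length_eq_zero_iff] using hne
      rw [if_pos hlen, hm', hmm]
      rfl
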